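-- pv_equiv track=rewrite | github.com/emilioispano/superdomains | SuperDomains.py | sort_uids
-- ===== SOURCE A (Python) =====
-- def sort_uids(mapp):
--     tmp = {}
--     uids = []
--
--     for uid, t in mapp.items():
--         if t in tmp:
--             tmp[t].append(uid)
--         else:
--             tmp[t] = [uid]
--
--     keys = list(tmp.keys())
--     keys.sort(reverse=True)
--
--     for v in keys:
--         for t in tmp[v]:
--             uids.append(t)
--
--     return uids
-- ===== SOURCE B (Python) =====
-- def sort_uids(mapp):
--     return [uid for uid, _ in sorted(mapp.items(), key=lambda kv: kv[1], reverse=True)]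
-- ===== Notes on version B (the rewrite author's own statement) =====
-- stated objective: idiomatic
-- what changed: Replaced the two-phase scheme (group uids into a value-keyed dict, sort the distinct values descending, emit the buckets) with one direct stable sort of the items by value descending, relying on sort stability to keep ties in insertion order.
import Mathlib
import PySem

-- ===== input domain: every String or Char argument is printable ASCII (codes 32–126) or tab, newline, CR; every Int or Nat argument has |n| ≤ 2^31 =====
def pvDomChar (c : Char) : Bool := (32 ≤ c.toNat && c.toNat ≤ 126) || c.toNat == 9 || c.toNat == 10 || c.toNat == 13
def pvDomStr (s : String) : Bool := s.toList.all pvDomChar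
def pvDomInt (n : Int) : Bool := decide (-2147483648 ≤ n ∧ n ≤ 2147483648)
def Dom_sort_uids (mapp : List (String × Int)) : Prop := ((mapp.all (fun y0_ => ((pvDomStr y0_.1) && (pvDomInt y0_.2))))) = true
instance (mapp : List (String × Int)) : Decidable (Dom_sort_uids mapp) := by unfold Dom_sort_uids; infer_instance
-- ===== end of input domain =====

-- B replaces A's group-by-value dict + sort of the distinct values + bucket emission with a single
-- stable sort of the items by value descending (idiomatic; same asymptotic cost).

-- ===== PORT A =====
def sort_uids (mapp : List (String × Int)) : List String :=
  let tmp : PySem.Dict Int (List String) :=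
    mapp.foldl (fun tmp p =>
      if tmp.contains p.2 then tmp.modify p.2 [] (fun l => l ++ [p.1])
      else tmp.insert p.2 [p.1]) PySem.Dict.empty
  let keys := PySem.List.sorted tmp.keys (fun x => x) true
  keys.foldl (fun uids v => (tmp.getD v []).foldl (fun uids t => uids ++ [t]) uids) []

-- ===== PORT B =====
def sort_uids_alt (mapp : List (String × Int)) : List String :=
  (PySem.List.sorted mapp (fun p => p.2) true).map (fun p => p.1)

-- ===== PRECONDITION & SPEC =====
def Spec_sort_uids (mapp : List (String × Int)) (out : List String) : Prop := out = sort_uids_alt mapp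
instance (mapp : List (String × Int)) (out : List String) : Decidable (Spec_sort_uids mapp out) := by unfold Spec_sort_uids; infer_instance

-- ===== CLAIM (what is proved, stated in full; the proofs are below) =====
def Claim_equal_sort_uids : Prop := ∀ (mapp : List (String × Int)), Dom_sort_uids mapp → Spec_sort_uids mapp (sort_uids mapp)

-- ===== LEMMAS AND PROOFS =====

-- Two key-descending lists with identical per-key fibers are equal (uniqueness of a stable sort).
theorem pv_stable_unique {α : Type} (key : α → Int) :
    ∀ (ys zs : List α), ys.Pairwise (fun a b => key b ≤ key a) →
      zs.Pairwise (fun a b => key b ≤ key a) →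
      (∀ v : Int, ys.filter (fun x => key x == v) = zs.filter (fun x => key x == v)) →
      ys = zs := by
  intro ys
  induction ys with
  | nil =>
    intro zs _ _ hf
    cases zs with
    | nil => rfl
    | cons z zs' =>
      have := hf (key z)
      simp at this
  | cons y ys' ih =>
    intro zs hp hq hf
    cases zs with
    | nil =>
      have := hf (key y)
      simp at this
    | cons z zs' =>
      have hymem : y ∈ z :: zs' := by
        have := hf (key y)
        simp at this
        have : y ∈ List.filter (fun x => key x == key y) (z :: zs') := by
          rw [← this]; simp
        exact List.mem_of_mem_filter this
      have hzmem : z ∈ y :: ys' := by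
        have := hf (key z)
        simp at this
        have : z ∈ List.filter (fun x => key x == key z) (y :: ys') := by
          rw [this]; simp
        exact List.mem_of_mem_filter this
      have hkyz : key y = key z := by
        have h1 : key y ≤ key z := by
          rcases List.mem_cons.mp hymem with h | h
          · rw [h]
          · exact List.rel_of_pairwise_cons hq h
        have h2 : key z ≤ key y := by
          rcases List.mem_cons.mp hzmem with h | h
          · rw [h]
          · exact List.rel_of_pairwise_cons hp h
        omega
      have hhead := hf (key y)
      rw [List.filter_cons, List.filter_cons] at hhead
      simp [hkyz] at hhead
      obtain ⟨hyz, htail⟩ := hhead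
      have hf' : ∀ v : Int, ys'.filter (fun x => key x == v) = zs'.filter (fun x => key x == v) := by
        intro v
        by_cases hv : key y = v
        · rw [← hv, hkyz]; exact htail
        · have := hf v
          rw [List.filter_cons, List.filter_cons] at this
          simp [hv, hkyz ▸ hv] at this
          simpa [hv, ← hkyz, hyz] using this
      rw [hyz, ih zs' (List.Pairwise.of_cons hp) (List.Pairwise.of_cons hq) hf']

-- Filtering one fiber out of an insertBy into a key-descending list.
theorem pv_insertBy_filter {α : Type} (key : α → Int) (x : α) (v : Int) :
    ∀ (ys : List α), ys.Pairwise (fun a b => key b ≤ key a) →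
      (PySem.List.insertBy (fun a b => decide (key b < key a)) x ys).filter (fun y => key y == v) =
        (if key x == v then ys.filter (fun y => key y == v) ++ [x]
         else ys.filter (fun y => key y == v)) := by
  intro ys
  induction ys with
  | nil =>
    intro _
    simp [PySem.List.insertBy, List.filter]
    split <;> simp_all
  | cons y ys' ih =>
    intro hp
    show (if decide (key y < key x) = true then x :: y :: ys'
          else y :: PySem.List.insertBy (fun a b => decide (key b < key a)) x ys').filter
            (fun y => key y == v) = _
    by_cases hlt : key y < key x
    · simp only [hlt, decide_true, if_true]
      by_cases hxv : key x = v
      · have hnil : (y :: ys').filter (fun z => key z == v) = [] := by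
          rw [List.filter_eq_nil_iff]
          intro a ha
          have : key a ≤ key y := by
            rcases List.mem_cons.mp ha with h | h
            · rw [h]
            · exact List.rel_of_pairwise_cons hp h
          simp; omega
        simp [hxv, hnil]
      · simp [List.filter_cons, hxv]
    · simp only [hlt, decide_false, Bool.false_eq_true, if_false]
      rw [List.filter_cons]
      rw [ih (List.Pairwise.of_cons hp)]
      by_cases hxv : key x = v <;> by_cases hyv : key y = v <;>
        simp [hxv, hyv]

-- Stability of sorted(…, reverse=True): every per-key fiber is kept in input order.
theorem pv_sorted_rev_filter {α : Type} (key : α → Int) (l : List α) (v : Int) :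
    (PySem.List.sorted l key true).filter (fun x => key x == v) =
      l.filter (fun x => key x == v) := by
  induction l using List.reverseRecOn with
  | nil => simp [PySem.List.sorted_rev_eq_foldl_insertBy]
  | append_singleton l x ih =>
    rw [PySem.List.sorted_rev_eq_foldl_insertBy, List.foldl_append,
        ← PySem.List.sorted_rev_eq_foldl_insertBy]
    show (PySem.List.insertBy (fun a b => decide (key b < key a)) x
            (PySem.List.sorted l key true)).filter (fun y => key y == v) = _
    rw [pv_insertBy_filter key x v _ (PySem.List.sorted_pairwise_rev l key)]
    rw [ih, List.filter_append]
    by_cases hxv : key x = v <;> simp [hxv]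

-- flatMap over a Nodup list of an 'only at u' function keeps just u's block.
theorem pv_flatMap_ite_nodup {α : Type} (F : List α) (u : Int) :
    ∀ (D : List Int), D.Nodup →
      (D.flatMap (fun v => if v = u then F else [])) = if u ∈ D then F else [] := by
  intro D
  induction D with
  | nil => simp
  | cons d D' ih =>
    intro hnd
    rw [List.flatMap_cons, ih hnd.of_cons]
    by_cases hdu : d = u
    · subst hdu
      have : d ∉ D' := (List.nodup_cons.mp hnd).1
      simp [this]
    · simp [hdu, List.mem_cons, Ne.symm hdu]

-- The stable descending sort is the concatenation of the fibers in descending key order.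
theorem pv_sorted_rev_eq_flatMap {α : Type} (key : α → Int) (l : List α) :
    PySem.List.sorted l key true =
      (PySem.List.sorted (PySem.Set.ofList (l.map key)) (fun x => x) true).flatMap
        (fun v => l.filter (fun x => key x == v)) := by
  set D := PySem.List.sorted (PySem.Set.ofList (l.map key)) (fun x => x) true with hD
  have hD_nodup : D.Nodup :=
    (PySem.List.sorted_perm _ _ _).symm.nodup (PySem.Set.nodup_ofList _)
  have hD_mem : ∀ u : Int, u ∈ D ↔ u ∈ l.map key := by
    intro u
    rw [hD, PySem.List.mem_sorted, PySem.Set.mem_ofList]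
  have hD_pair : D.Pairwise (fun a b => b ≤ a) := PySem.List.sorted_pairwise_rev _ _
  apply pv_stable_unique key
  · exact PySem.List.sorted_pairwise_rev l key
  · rw [List.pairwise_flatMap]
    constructor
    · intro v _
      apply List.pairwise_of_forall_mem_list
      intro a ha b hb
      have ha' := (List.mem_filter.mp ha).2
      have hb' := (List.mem_filter.mp hb).2
      simp at ha' hb'
      omega
    · apply hD_pair.imp
      intro v w hwv x hx y hy
      have hx' := (List.mem_filter.mp hx).2
      have hy' := (List.mem_filter.mp hy).2
      simp at hx' hy'
      omega
  · intro u
    rw [pv_sorted_rev_filter, List.filter_flatMap]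
    have hcong : ∀ v ∈ D,
        (l.filter (fun x => key x == v)).filter (fun x => key x == u) =
          (if v = u then l.filter (fun x => key x == u) else []) := by
      intro v _
      by_cases hvu : v = u
      · subst hvu
        simp [List.filter_filter]
      · simp only [hvu, if_false]
        rw [List.filter_filter, List.filter_eq_nil_iff]
        intro a _
        simp
        omega
    rw [List.flatMap_congr hcong, pv_flatMap_ite_nodup _ _ _ hD_nodup]
    by_cases hu : u ∈ D
    · simp [hu]
    · simp only [hu, if_false]
      rw [List.filter_eq_nil_iff]
      intro a ha
      simp
      intro hk
      exact hu ((hD_mem u).mpr (hk ▸ List.mem_map_of_mem ha))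

-- A's grouping loop + sort of distinct values + bucket emission equals B's single stable sort.
theorem pv_main (mapp : List (String × Int)) : sort_uids mapp = sort_uids_alt mapp := by
  have hfun : (fun (tmp : PySem.Dict Int (List String)) (p : String × Int) =>
      if tmp.contains p.2 then tmp.modify p.2 [] (fun l => l ++ [p.1])
      else tmp.insert p.2 [p.1]) =
      (fun (tmp : PySem.Dict Int (List String)) (p : String × Int) =>
        tmp.modify p.2 [] (fun l => l ++ [p.1])) := by
    funext tmp p
    by_cases h : tmp.contains p.2
    · simp [h]
    · have h' : tmp.contains p.2 = false := by simpa using h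
      simp only [h', Bool.false_eq_true, if_false, PySem.Dict.modify]
      rw [PySem.Dict.getD_of_not_contains]
      · rfl
      · exact h'
  have hswap : mapp.foldl (fun d p => d.modify p.2 [] (fun l => l ++ [p.1])) PySem.Dict.empty
      = (mapp.map Prod.swap).foldl
          (fun d p => d.modify p.1 [] (fun l => l ++ [p.2])) PySem.Dict.empty := by
    rw [List.foldl_map]
    rfl
  have hgetD : ∀ v : Int,
      (mapp.foldl (fun d p => d.modify p.2 [] (fun l => l ++ [p.1]))
        PySem.Dict.empty).getD v []
      = (mapp.filter (fun p => p.2 == v)).map (fun p => p.1) := by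
    intro v
    rw [hswap, PySem.Dict.getD_foldl_modify_append]
    rw [List.filter_map, List.map_map]
    simp [PySem.Dict.getD_empty]
    rfl
  have hkeys : (mapp.foldl (fun d p => d.modify p.2 [] (fun l => l ++ [p.1]))
        PySem.Dict.empty).keys = PySem.Set.ofList (mapp.map (fun p => p.2)) := by
    rw [PySem.Dict.keys_foldl_modify_key mapp (fun p => p.2) []
      (fun _ p => fun l => l ++ [p.1]) PySem.Dict.empty]
    rw [PySem.Dict.keys_empty, PySem.Set.update_nil_left]
  simp only [sort_uids, sort_uids_alt, hfun]
  simp only [PySem.List.foldl_append_singleton_eq_self]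
  rw [PySem.List.foldl_append_eq_flatMap, List.nil_append, hkeys]
  rw [List.flatMap_congr (fun v _ => hgetD v)]
  rw [← List.map_flatMap, ← pv_sorted_rev_eq_flatMap (fun p => p.2) mapp]

-- ===== VERDICT (by name: the statement is the Claim_ definition above) =====
theorem sort_uids_spec : Claim_equal_sort_uids := by
  intro mapp _
  unfold Spec_sort_uids
  exact pv_main mapp
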